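-- pv_equiv track=rewrite | github.com/aleksandra-tucholska/paldus | paldus_acm.py | mark_repeated_indices
-- ===== SOURCE A (Python) =====
-- def mark_repeated_indices(lst):
--     counter = {}
--     for item in lst:
--         counter[item] = counter.get(item, 0) + 1
--
--     result = []
--     for item in lst:
--         if counter[item] > 1:
--             result.append(0)
--         else:
--             result.append(1)
--
--     return result
-- ===== SOURCE B (Python) =====
-- def mark_repeated_indices(lst):
--     result = [1] * len(lst)
--     first = {}
--     for i, value in enumerate(lst):
--         if value in first:
--             result[i] = 0
--             result[first[value]] = 0
--         else:
--             first[value] = i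
--     return result
-- ===== Notes on version B (the rewrite author's own statement) =====
-- stated objective: alternative
-- what changed: replaces the two-pass count-then-classify scheme (build a full Counter, then map each element through its count) by a single pass that pre-fills the result with 1s, records the first index of each value, and back-patches both positions to 0 when a duplicate is seen
import Mathlib
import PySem

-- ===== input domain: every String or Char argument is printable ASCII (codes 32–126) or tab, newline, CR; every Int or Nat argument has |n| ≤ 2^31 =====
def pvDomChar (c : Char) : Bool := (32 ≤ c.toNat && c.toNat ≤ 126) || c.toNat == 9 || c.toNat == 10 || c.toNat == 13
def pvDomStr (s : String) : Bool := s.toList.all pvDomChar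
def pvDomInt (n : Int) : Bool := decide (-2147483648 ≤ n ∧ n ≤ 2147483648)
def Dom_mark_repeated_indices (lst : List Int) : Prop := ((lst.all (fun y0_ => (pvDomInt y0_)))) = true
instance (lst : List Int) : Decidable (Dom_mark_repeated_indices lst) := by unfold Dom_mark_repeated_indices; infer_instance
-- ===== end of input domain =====

-- B replaces A's two passes (count everything, then classify each element by its count) with one
-- pass that pre-fills 1s, records first indices and back-patches both positions to 0 on a duplicate
-- (objective: alternative).

-- ===== PORT A =====
def mark_repeated_indices (lst : List Int) : List Int :=
  let counter : PySem.Dict Int Int :=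
    lst.foldl (fun d item => d.insert item (d.getD item 0 + 1)) PySem.Dict.empty
  lst.foldl (fun result item => result ++ [if counter.getD item 0 > 1 then 0 else 1]) []

-- ===== PORT B =====
-- the 'for i, value in enumerate(lst)' loop of Source B; 'value in first' + 'first[value]' is one get?
def markAltLoop (i : Nat) (vs : List Int) (res : List Int) (first : PySem.Dict Int Nat) : List Int :=
  match vs with
  | [] => res
  | v :: rest =>
    match first.get? v with
    | some j => markAltLoop (i + 1) rest ((res.set i 0).set j 0) first
    | none => markAltLoop (i + 1) rest res (first.insert v i)

def mark_repeated_indices_alt (lst : List Int) : List Int :=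
  markAltLoop 0 lst (List.replicate lst.length 1) PySem.Dict.empty

-- ===== PRECONDITION & SPEC =====
def Spec_mark_repeated_indices (lst : List Int) (out : List Int) : Prop := out = mark_repeated_indices_alt lst
instance (lst : List Int) (out : List Int) : Decidable (Spec_mark_repeated_indices lst out) := by unfold Spec_mark_repeated_indices; infer_instance

-- ===== CLAIM (what is proved, stated in full; the proofs are below) =====
def Claim_equal_mark_repeated_indices : Prop := ∀ (lst : List Int), Dom_mark_repeated_indices lst → Spec_mark_repeated_indices lst (mark_repeated_indices lst)

-- ===== LEMMAS AND PROOFS =====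

-- intended value at position j once the prefix `pre` has been processed
def pvG (pre : List Int) (j : Nat) : Int :=
  if j < pre.length ∧ 2 ≤ pre.count (pre.getD j 0) then 0 else 1

lemma pv_getD_set (l : List Int) (n m : Nat) (a : Int) :
    (l.set n a).getD m 0 = if n = m ∧ n < l.length then a else l.getD m 0 := by
  rw [List.getD_eq_getElem?_getD, List.getD_eq_getElem?_getD, List.getElem?_set]
  by_cases h1 : n = m
  · subst h1
    by_cases h2 : n < l.length
    · simp [h2]
    · have h3 : l[n]? = none := List.getElem?_eq_none (by omega)
      rw [if_neg (by omega : ¬(n = n ∧ n < l.length)), h3]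
      simp [h2]
  · simp [h1]

lemma pv_two_le_count {l : List Int} {i j : Nat} (hi : i < l.length) (hj : j < l.length)
    (hne : i ≠ j) (hv : l[i] = l[j]) : 2 ≤ l.count l[j] := by
  rw [← List.duplicate_iff_two_le_count, List.duplicate_iff_exists_distinct_get]
  rcases Nat.lt_or_ge i j with h | h
  · exact ⟨⟨i, hi⟩, ⟨j, hj⟩, Fin.mk_lt_mk.mpr h, by simp [List.get_eq_getElem, hv],
      by simp [List.get_eq_getElem]⟩
  · exact ⟨⟨j, hj⟩, ⟨i, hi⟩, Fin.mk_lt_mk.mpr (by omega), by simp [List.get_eq_getElem],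
      by simp [List.get_eq_getElem, hv]⟩

lemma pv_count_append_singleton (l : List Int) (v w : Int) :
    (l ++ [v]).count w = l.count w + if v = w then 1 else 0 := by
  simp [List.count_append, List.count_singleton]

lemma markAltLoop_inv (suf : List Int) : ∀ (pre res : List Int) (d : PySem.Dict Int Nat),
    res.length = pre.length + suf.length →
    (∀ j, j < res.length → res.getD j 0 = pvG pre j) →
    (∀ v j, d.get? v = some j → j < pre.length ∧ pre.getD j 0 = v) →
    (∀ v, d.get? v = none → v ∉ pre) →
    (markAltLoop pre.length suf res d).length = pre.length + suf.length ∧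
      ∀ j, j < pre.length + suf.length →
        (markAltLoop pre.length suf res d).getD j 0 = pvG (pre ++ suf) j := by
  induction suf with
  | nil =>
    intro pre res d hlen hres _ _
    constructor
    · simpa [markAltLoop] using hlen
    · intro j hj
      simp only [markAltLoop, List.append_nil]
      exact hres j (by omega)
  | cons v rest ih =>
    intro pre res d hlen hres hsome hnone
    have hlenpre : (pre ++ [v]).length = pre.length + 1 := by simp
    cases hdv : d.get? v with
    | some j =>
      obtain ⟨hjlt, hjv⟩ := hsome v j hdv
      have hvmem : v ∈ pre := by
        rw [← hjv, List.getD_eq_getElem _ _ hjlt]; exact List.getElem_mem hjlt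
      have hcv : 1 ≤ pre.count v := List.one_le_count_iff.mpr hvmem
      have hgv : (pre ++ [v]).getD pre.length 0 = v := by
        rw [List.getD_append_right _ _ _ _ (le_refl _)]; simp
      have hgj : (pre ++ [v]).getD j 0 = v := by
        rw [List.getD_append _ _ _ _ hjlt]; exact hjv
      have step : markAltLoop pre.length (v :: rest) res d
          = markAltLoop (pre.length + 1) rest ((res.set pre.length 0).set j 0) d := by
        simp [markAltLoop, hdv]
      rw [step]
      have main := ih (pre ++ [v]) ((res.set pre.length 0).set j 0) d
        (by simp only [List.length_set, List.length_append, List.length_cons,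
              List.length_nil] at hlen ⊢; omega)
        (by
          intro i hi
          simp only [List.length_set] at hi
          rw [pv_getD_set, pv_getD_set]
          by_cases hij : j = i
          · subst hij
            rw [if_pos ⟨rfl, by simp only [List.length_set]; omega⟩]
            have hc : j < (pre ++ [v]).length ∧ 2 ≤ (pre ++ [v]).count ((pre ++ [v]).getD j 0) :=
              ⟨by simp only [hlenpre]; omega,
               by rw [hgj, pv_count_append_singleton, if_pos rfl]; omega⟩
            simp only [pvG, if_pos hc]
          · rw [if_neg (fun h => hij h.1)]
            by_cases hik : pre.length = i
            · subst hik
              rw [if_pos ⟨rfl, by omega⟩]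
              have hc : pre.length < (pre ++ [v]).length ∧
                  2 ≤ (pre ++ [v]).count ((pre ++ [v]).getD pre.length 0) :=
                ⟨by simp only [hlenpre]; omega,
                 by rw [hgv, pv_count_append_singleton, if_pos rfl]; omega⟩
              simp only [pvG, if_pos hc]
            · rw [if_neg (fun h => hik h.1), hres i (by omega)]
              by_cases hilt : i < pre.length
              · have hgi : (pre ++ [v]).getD i 0 = pre.getD i 0 := List.getD_append _ _ _ _ hilt
                by_cases hwv : pre.getD i 0 = v
                · have h2 : 2 ≤ pre.count (pre.getD i 0) := by
                    have hji : pre[j] = pre[i] := by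
                      rw [← List.getD_eq_getElem _ 0 hjlt, ← List.getD_eq_getElem _ 0 hilt,
                        hjv, hwv]
                    have := pv_two_le_count hjlt hilt (by omega) hji
                    rwa [List.getD_eq_getElem _ _ hilt]
                  have hcl : i < pre.length ∧ 2 ≤ pre.count (pre.getD i 0) := ⟨hilt, h2⟩
                  have hcr : i < (pre ++ [v]).length ∧
                      2 ≤ (pre ++ [v]).count ((pre ++ [v]).getD i 0) :=
                    ⟨by simp only [hlenpre]; omega,
                     by rw [hgi, pv_count_append_singleton]; split_ifs <;> omega⟩
                  simp only [pvG, if_pos hcl, if_pos hcr]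
                · have e1 : (i < pre.length ∧ 2 ≤ pre.count (pre.getD i 0)) =
                      (i < (pre ++ [v]).length ∧ 2 ≤ pre.count (pre.getD i 0)) := by
                    apply propext; constructor
                    · rintro ⟨_, b⟩; exact ⟨by simp only [hlenpre]; omega, b⟩
                    · rintro ⟨_, b⟩; exact ⟨hilt, b⟩
                  simp only [pvG, hgi, pv_count_append_singleton,
                    if_neg (fun h : v = pre.getD i 0 => hwv h.symm), Nat.add_zero, e1]
              · have hn2 : ¬(i < (pre ++ [v]).length ∧
                    2 ≤ (pre ++ [v]).count ((pre ++ [v]).getD i 0)) := by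
                  rintro ⟨h1, _⟩; simp only [hlenpre] at h1; omega
                have hn1 : ¬(i < pre.length ∧ 2 ≤ pre.count (pre.getD i 0)) :=
                  fun h => hilt h.1
                simp only [pvG, if_neg hn1, if_neg hn2])
        (by
          intro v' j' h
          obtain ⟨h1, h2⟩ := hsome v' j' h
          exact ⟨by omega, by rw [List.getD_append _ _ _ _ h1]; exact h2⟩)
        (by
          intro v' h
          have hne : v' ≠ v := fun he => by rw [he, hdv] at h; cases h
          have := hnone v' h
          simp [this, hne])
      rw [List.append_assoc] at main
      simp only [List.singleton_append] at main
      rw [hlenpre] at main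
      refine ⟨by rw [main.1]; simp only [List.length_cons]; omega, fun j' hj' => ?_⟩
      exact main.2 j' (by simp only [List.length_cons] at hj'; omega)
    | none =>
      have hvnot : v ∉ pre := hnone v hdv
      have hgv : (pre ++ [v]).getD pre.length 0 = v := by
        rw [List.getD_append_right _ _ _ _ (le_refl _)]; simp
      have step : markAltLoop pre.length (v :: rest) res d
          = markAltLoop (pre.length + 1) rest res (d.insert v pre.length) := by
        simp [markAltLoop, hdv]
      rw [step]
      have main := ih (pre ++ [v]) res (d.insert v pre.length)
        (by simp only [List.length_append, List.length_cons, List.length_nil] at hlen ⊢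
            omega)
        (by
          intro i hi
          rw [hres i hi]
          by_cases hik : i = pre.length
          · subst hik
            have hn1 : ¬(pre.length < pre.length ∧ 2 ≤ pre.count (pre.getD pre.length 0)) :=
              fun h => lt_irrefl _ h.1
            have hn2 : ¬(pre.length < (pre ++ [v]).length ∧
                2 ≤ (pre ++ [v]).count ((pre ++ [v]).getD pre.length 0)) := by
              rintro ⟨_, h2⟩
              rw [hgv, pv_count_append_singleton, if_pos rfl,
                List.count_eq_zero.mpr hvnot] at h2
              omega
            simp only [pvG, if_neg hn1, if_neg hn2]
          · by_cases hilt : i < pre.length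
            · have hgi : (pre ++ [v]).getD i 0 = pre.getD i 0 := List.getD_append _ _ _ _ hilt
              have hwv : pre.getD i 0 ≠ v := by
                rw [List.getD_eq_getElem _ _ hilt]
                intro h; exact hvnot (h ▸ List.getElem_mem hilt)
              have e1 : (i < pre.length ∧ 2 ≤ pre.count (pre.getD i 0)) =
                  (i < (pre ++ [v]).length ∧ 2 ≤ pre.count (pre.getD i 0)) := by
                apply propext; constructor
                · rintro ⟨_, b⟩; exact ⟨by simp only [hlenpre]; omega, b⟩
                · rintro ⟨_, b⟩; exact ⟨hilt, b⟩
              simp only [pvG, hgi, pv_count_append_singleton,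
                if_neg (fun h : v = pre.getD i 0 => hwv h.symm), Nat.add_zero, e1]
            · have hn2 : ¬(i < (pre ++ [v]).length ∧
                  2 ≤ (pre ++ [v]).count ((pre ++ [v]).getD i 0)) := by
                rintro ⟨h1, _⟩; simp only [hlenpre] at h1; omega
              have hn1 : ¬(i < pre.length ∧ 2 ≤ pre.count (pre.getD i 0)) :=
                fun h => hilt h.1
              simp only [pvG, if_neg hn1, if_neg hn2])
        (by
          intro v' j' h
          rw [PySem.Dict.get?_insert] at h
          by_cases hv' : v' = v
          · rw [if_pos hv'] at h
            injection h with h2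
            subst h2
            refine ⟨by simp only [hlenpre]; omega, ?_⟩
            rw [hv']; exact hgv
          · rw [if_neg hv'] at h
            obtain ⟨h1, h2⟩ := hsome v' j' h
            exact ⟨by omega, by rw [List.getD_append _ _ _ _ h1]; exact h2⟩)
        (by
          intro v' h
          rw [PySem.Dict.get?_insert] at h
          by_cases hv' : v' = v
          · rw [if_pos hv'] at h; cases h
          · rw [if_neg hv'] at h
            have := hnone v' h
            simp [this, hv'])
      rw [List.append_assoc] at main
      simp only [List.singleton_append] at main
      rw [hlenpre] at main
      refine ⟨by rw [main.1]; simp only [List.length_cons]; omega, fun j' hj' => ?_⟩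
      exact main.2 j' (by simp only [List.length_cons] at hj'; omega)

-- characterization of B
lemma alt_getD (lst : List Int) :
    (mark_repeated_indices_alt lst).length = lst.length ∧
      ∀ j, j < lst.length → (mark_repeated_indices_alt lst).getD j 0 = pvG lst j := by
  have h := markAltLoop_inv lst [] (List.replicate lst.length 1) PySem.Dict.empty
    (by simp)
    (by intro j hj
        rw [List.getD_replicate (h := by simpa using hj)]
        simp [pvG])
    (by intro v j h; rw [PySem.Dict.get?_empty] at h; cases h)
    (by intro v _; simp)
  simpa [mark_repeated_indices_alt] using h

-- characterization of A
lemma a_eq_map (lst : List Int) :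
    mark_repeated_indices lst = lst.map (fun item => if lst.count item > 1 then 0 else 1) := by
  unfold mark_repeated_indices
  rw [PySem.List.foldl_append_singleton_eq_map]
  refine List.map_congr_left ?_
  intro x _
  rw [PySem.Dict.getD_foldl_insert_add_one]
  simp

-- ===== VERDICT (by name: the statement is the Claim_ definition above) =====
theorem mark_repeated_indices_spec : Claim_equal_mark_repeated_indices := by
  intro lst _
  unfold Spec_mark_repeated_indices
  obtain ⟨hlen, hget⟩ := alt_getD lst
  rw [a_eq_map]
  apply List.ext_getElem (by simp [hlen])
  intro j h1 h2
  have hj : j < lst.length := by simpa using h1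
  have hb := hget j hj
  rw [List.getD_eq_getElem _ _ h2] at hb
  rw [hb]
  simp only [List.getElem_map, pvG, hj, true_and]
  rw [List.getD_eq_getElem _ _ hj]
  rfl
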